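-- pv_equiv track=rewrite | github.com/ILeXeIR/advent_of_code_2023 | d14t1.py | count_load
-- ===== SOURCE A (Python) =====
-- def count_load(line, length):
--     sum_load = 0
--     rock_load = length
--     for i, dot in enumerate(line):
--         if dot == "O":
--             sum_load += rock_load
--             rock_load -= 1
--         elif dot == "#":
--             rock_load = length - i - 1
--     return sum_load
-- ===== SOURCE B (Python) =====
-- def count_load(line, length):
--     total = 0
--     pos = 0
--     for seg in line.split('#'):
--         k = seg.count('O')
--         landing = length - pos
--         total += k * landing - k * (k - 1) // 2
--         pos += len(seg) + 1
--     return total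
-- ===== Notes on version B (the rewrite author's own statement) =====
-- stated objective: faster
-- what changed: Replaced the per-character accumulation with a split('#') into segments and a closed-form arithmetic-series total k*landing - k*(k-1)//2 per segment.
import Mathlib
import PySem

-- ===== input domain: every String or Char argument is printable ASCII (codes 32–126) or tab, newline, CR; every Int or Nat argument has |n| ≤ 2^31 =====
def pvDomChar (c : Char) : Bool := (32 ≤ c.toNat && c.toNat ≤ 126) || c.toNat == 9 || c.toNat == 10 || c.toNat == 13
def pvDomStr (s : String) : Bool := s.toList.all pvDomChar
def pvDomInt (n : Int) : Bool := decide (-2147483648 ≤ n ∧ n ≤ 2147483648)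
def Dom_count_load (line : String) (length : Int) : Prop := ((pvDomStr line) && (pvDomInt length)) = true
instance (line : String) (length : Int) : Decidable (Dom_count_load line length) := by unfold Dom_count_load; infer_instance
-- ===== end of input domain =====

-- B replaces A's per-character loop by split-on-'#' plus a closed-form per-segment sum (objective: faster, constant-factor in Python).

-- ===== PORT A =====
-- the for-loop over enumerate(line), state (sum_load, rock_load), index i
def countA (length : Int) : List Char → Int → Int → Int → Int
  | [], _, s, _ => s
  | c :: t, i, s, r =>
    if c = 'O' then countA length t (i + 1) (s + r) (r - 1)
    else if c = '#' then countA length t (i + 1) s (length - i - 1)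
    else countA length t (i + 1) s r

def count_load (line : String) (length : Int) : Int :=
  countA length line.toList 0 0 length

-- ===== PORT B =====
-- line.split('#') (hand transcription of str.split with a one-char separator: empty pieces kept)
def splitHash : List Char → List (List Char)
  | [] => [[]]
  | c :: t =>
    if c = '#' then [] :: splitHash t
    else
      match splitHash t with
      | [] => [[c]]
      | s :: rest => (c :: s) :: rest

-- the for-loop over the segments, state (total, pos)
def foldB (length : Int) : List (List Char) → Int → Int → Int
  | [], total, _ => total
  | seg :: rest, total, pos =>
    let k : Int := (seg.count 'O' : Int)
    let landing := length - pos
    foldB length rest (total + (k * landing - PySem.Int.floordiv (k * (k - 1)) 2)) (pos + (seg.length : Int) + 1)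

def count_load_alt (line : String) (length : Int) : Int :=
  foldB length (splitHash line.toList) 0 0

-- ===== PRECONDITION & SPEC =====
def Spec_count_load (line : String) (length : Int) (out : Int) : Prop := out = count_load_alt line length
instance (line : String) (length : Int) (out : Int) : Decidable (Spec_count_load line length out) := by unfold Spec_count_load; infer_instance

-- ===== CLAIM (what is proved, stated in full; the proofs are below) =====
def Claim_equal_count_load : Prop := ∀ (line : String) (length : Int), Dom_count_load line length → Spec_count_load line length (count_load line length)

-- ===== LEMMAS AND PROOFS =====

theorem foldB_congr (length : Int) (xs : List (List Char)) {a a' p p' : Int}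
    (h1 : a = a') (h2 : p = p') : foldB length xs a p = foldB length xs a' p' := by
  rw [h1, h2]

theorem splitHash_ne_nil (cs : List Char) : splitHash cs ≠ [] := by
  cases cs with
  | nil => simp [splitHash]
  | cons c t =>
    simp only [splitHash]
    split
    · simp
    · cases h : splitHash t <;> simp

-- one 'O' step of A absorbed into the closed form: r + T k (r-1) = T (k+1) r
theorem Tstep (k r : Int) :
    r + (k * (r - 1) - PySem.Int.floordiv (k * (k - 1)) 2)
      = (k + 1) * r - PySem.Int.floordiv ((k + 1) * ((k + 1) - 1)) 2 := by
  obtain ⟨m, hm⟩ : Even (k * (k - 1)) := by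
    have := Int.even_mul_succ_self (k - 1)
    simpa [mul_comm, sub_add_cancel] using this
  simp only [PySem.Int.floordiv_eq_ediv_of_pos (by norm_num : (0:Int) < 2)]
  have e : (k + 1) * ((k + 1) - 1) = k * (k - 1) + 2 * k := by ring
  rw [e, hm]
  have h1 : (m + m) / 2 = m := by omega
  have h2 : (m + m + 2 * k) / 2 = m + k := by omega
  rw [h1, h2]
  ring

-- the main invariant: A's loop from index i with rock r equals B's per-segment sums,
-- the first segment charged at r, the rest at length - pos
theorem main_inv (length : Int) (cs : List Char) :
    ∀ (i s r : Int),
      countA length cs i s r =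
        match splitHash cs with
        | [] => s
        | seg :: rest =>
            foldB length rest
              (s + (((seg.count 'O' : Nat) : Int) * r
                  - PySem.Int.floordiv (((seg.count 'O' : Nat) : Int) * (((seg.count 'O' : Nat) : Int) - 1)) 2))
              (i + (seg.length : Int) + 1) := by
  induction cs with
  | nil =>
    intro i s r
    simp [countA, splitHash, foldB, PySem.Int.floordiv]
  | cons c t ih =>
    intro i s r
    obtain ⟨seg, rest, hsp⟩ : ∃ seg rest, splitHash t = seg :: rest := by
      cases h : splitHash t with
      | nil => exact absurd h (splitHash_ne_nil t)
      | cons a b => exact ⟨a, b, rfl⟩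
    by_cases hc : c = '#'
    · subst hc
      simp only [countA, splitHash, if_neg (by decide : ¬('#' = 'O'))]
      rw [ih (i + 1) s (length - i - 1), hsp]
      show _ = foldB _ (_ :: _) _ _
      rw [foldB]
      apply foldB_congr
      · have hz : PySem.Int.floordiv (0 : Int) 2 = 0 := by decide
        simp only [List.count_nil, Nat.cast_zero, zero_mul, List.length_nil, hz]
        ring
      · simp only [List.length_nil, Nat.cast_zero]
        ring
    · by_cases ho : c = 'O'
      · subst ho
        simp only [countA, splitHash, if_neg hc, hsp]
        rw [ih (i + 1) (s + r) (r - 1), hsp]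
        simp only [List.count_cons_self, List.length_cons]
        apply foldB_congr
        · have := Tstep ((seg.count 'O' : Nat) : Int) r
          push_cast
          push_cast at this
          linarith [this]
        · push_cast; ring
      · simp only [countA, if_neg ho, if_neg hc, splitHash, hsp]
        rw [ih (i + 1) s r, hsp]
        have hcnt : (c :: seg).count 'O' = seg.count 'O' := by
          simp [ho]
        rw [hcnt]
        simp only [List.length_cons]
        apply foldB_congr
        · rfl
        · push_cast; ring

-- ===== VERDICT (by name: the statement is the Claim_ definition above) =====
theorem count_load_spec : Claim_equal_count_load := by
  intro line length _
  unfold Spec_count_load count_load count_load_alt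
  rw [main_inv]
  obtain ⟨seg, rest, hsp⟩ : ∃ seg rest, splitHash line.toList = seg :: rest := by
    cases h : splitHash line.toList with
    | nil => exact absurd h (splitHash_ne_nil line.toList)
    | cons a b => exact ⟨a, b, rfl⟩
  rw [hsp]
  simp only [foldB]
  apply foldB_congr
  · ring_nf
  · ring
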